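-- pv_equiv track=rewrite | github.com/carodewig/advent-of-code | 2019/day_10.py | can_divide
-- ===== SOURCE A (Python) =====
-- def can_divide(x):
--     if x == 0:
--         return True
--     if x == 1:
--         return False
--
--     for y in range(2, x+1):
--         if x % y == 0:
--             return True
--
--     return False
-- ===== SOURCE B (Python) =====
-- def can_divide(x):
--     # Closed form: every x >= 2 divides itself, x == 0 is divisible by anything,
--     # x == 1 and negative x (empty range in A) give False.
--     return x == 0 or x >= 2
-- ===== Notes on version B (the rewrite author's own statement) =====
-- stated objective: simpler
-- what changed: Replaces the trial-division loop with a closed-form boolean (x == 0 or x >= 2), which matches A's truth table for all integers including the empty-range negatives.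
import Mathlib
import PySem

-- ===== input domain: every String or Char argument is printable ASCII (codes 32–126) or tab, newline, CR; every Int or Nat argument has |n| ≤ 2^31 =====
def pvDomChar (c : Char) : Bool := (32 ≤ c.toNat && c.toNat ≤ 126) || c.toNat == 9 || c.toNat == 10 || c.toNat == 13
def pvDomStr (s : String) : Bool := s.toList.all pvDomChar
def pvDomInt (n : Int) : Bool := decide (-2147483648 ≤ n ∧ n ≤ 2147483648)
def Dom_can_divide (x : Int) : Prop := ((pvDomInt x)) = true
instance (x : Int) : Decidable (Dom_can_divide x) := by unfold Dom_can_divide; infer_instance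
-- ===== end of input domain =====

-- B replaces A's trial-division loop with the closed form (x == 0 or x >= 2); objective: simpler.

-- ===== PORT A =====
-- loop 'for y in range(2, x+1): if x % y == 0: return True' with early return,
-- as structural recursion on the number of remaining iterations
def canDivideLoop (x y : Int) : Nat → Bool
  | 0 => false
  | n+1 => if PySem.Int.mod x y == 0 then true else canDivideLoop x (y+1) n

def can_divide (x : Int) : Bool :=
  if x == 0 then true
  else if x == 1 then false
  else if canDivideLoop x 2 ((x + 1) - 2).toNat then true
  else false

-- ===== PORT B =====
def can_divide_alt (x : Int) : Bool :=
  x == 0 || decide (2 ≤ x)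

-- ===== PRECONDITION & SPEC =====
def Spec_can_divide (x : Int) (out : Bool) : Prop := out = can_divide_alt x
instance (x : Int) (out : Bool) : Decidable (Spec_can_divide x out) := by unfold Spec_can_divide; infer_instance

-- ===== CLAIM (what is proved, stated in full; the proofs are below) =====
def Claim_equal_can_divide : Prop := ∀ (x : Int), Dom_can_divide x → Spec_can_divide x (can_divide x)

-- ===== LEMMAS AND PROOFS =====
lemma loop_true_of_le (x : Int) (hx : 2 ≤ x) :
    ∀ (n : Nat) (y : Int), 2 ≤ y → y ≤ x → (x - y).toNat < n → canDivideLoop x y n = true := by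
  intro n
  induction n with
  | zero => intro y _ _ h; omega
  | succ m ih =>
    intro y hy2 hyx hn
    unfold canDivideLoop
    by_cases hmod : PySem.Int.mod x y = 0
    · simp [hmod]
    · have hyne : y ≠ x := by
        intro h; subst h; exact hmod (by simp [PySem.Int.mod])
      simp only [beq_iff_eq, hmod, if_false]
      exact ih (y+1) (by omega) (by omega) (by omega)

lemma loop_false_of_neg (x : Int) (hx : x < 0) :
    canDivideLoop x 2 ((x + 1) - 2).toNat = false := by
  have h0 : ((x + 1) - 2).toNat = 0 := by omega
  rw [h0]; rfl

-- ===== VERDICT (by name: the statement is the Claim_ definition above) =====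
theorem can_divide_spec : Claim_equal_can_divide := by
  intro x _
  unfold Spec_can_divide can_divide can_divide_alt
  by_cases h0 : x = 0
  · simp [h0]
  · by_cases h1 : x = 1
    · simp [h1]
    · by_cases h2 : 2 ≤ x
      · have := loop_true_of_le x h2 ((x + 1) - 2).toNat 2 (by omega) h2 (by omega)
        simp [h0, h1, h2, this]
      · have hneg : x < 0 := by omega
        simp [h0, h1, h2, loop_false_of_neg x hneg]
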